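-- pv_equiv track=rewrite | github.com/GaiYu0/QDGAT | qdgat/drop_reader.py | find_valid_spans
-- ===== SOURCE A (Python) =====
-- from typing import List, Dict, Any, Tuple
-- from collections import defaultdict, OrderedDict
--
-- IGNORED_TOKENS = {'a', 'an', 'the'}
--
-- USTRIPPED_CHARACTERS = ''.join([u"Ġ"])
--
-- def find_valid_spans(passage_tokens: List[str], answer_texts: List[str]) -> List[Tuple[int, int]]:
--     normalized_tokens = [token.strip(USTRIPPED_CHARACTERS).lower() for token in passage_tokens]
--     # normalized_tokens = passage_tokens
--     word_positions: Dict[str, List[int]] = defaultdict(list)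
--     for i, token in enumerate(normalized_tokens):
--         word_positions[token].append(i)
--     spans = []
--     for answer_text in answer_texts:
--         answer_tokens = [token.strip(USTRIPPED_CHARACTERS).lower() for token in answer_text.split()]
--         # answer_tokens = answer_text.split()
--         num_answer_tokens = len(answer_tokens)
--         if len(answer_tokens) <=0:
--             import ipdb
--             ipdb.set_trace()
--             xxx=0
--         if answer_tokens[0] not in word_positions:
--             continue
--         for span_start in word_positions[answer_tokens[0]]:
--             span_end = span_start  # span_end is _inclusive_
--             answer_index = 1
--             while answer_index < num_answer_tokens and span_end + 1 < len(normalized_tokens):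
--                 token = normalized_tokens[span_end + 1]
--                 if answer_tokens[answer_index] == token:
--                     answer_index += 1
--                     span_end += 1
--                 elif token in IGNORED_TOKENS:
--                     span_end += 1
--                 else:
--                     break
--             if num_answer_tokens == answer_index:
--                 spans.append((span_start, span_end))
--     return spans
-- ===== SOURCE B (Python) =====
-- from typing import List, Tuple
--
-- IGNORED_TOKENS = {'a', 'an', 'the'}
--
-- USTRIPPED_CHARACTERS = ''.join([u"\u0120"])
--
--
-- def find_valid_spans(passage_tokens: List[str], answer_texts: List[str]) -> List[Tuple[int, int]]:
--     # Backward dynamic programming: for each answer, one right-to-left pass over the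
--     # passage tabulates match(p, j) = inclusive end of matching ans[j:] from position p
--     # (or None), so no position is ever re-scanned per start.
--     norm = [t.strip(USTRIPPED_CHARACTERS).lower() for t in passage_tokens]
--     n = len(norm)
--     spans = []
--     for answer_text in answer_texts:
--         ans = [t.strip(USTRIPPED_CHARACTERS).lower() for t in answer_text.split()]
--         m = len(ans)
--         if m == 0:
--             continue
--         nxt = [None] * m + [n - 1]          # row at position n
--         res1 = [None] * (n + 1)             # res1[p] = match(p, 1)
--         res1[n] = nxt[1]
--         for p in range(n - 1, -1, -1):
--             token = norm[p]
--             cur = [None] * (m + 1)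
--             cur[m] = p - 1
--             for j in range(m - 1, -1, -1):
--                 if token == ans[j]:
--                     cur[j] = nxt[j + 1]
--                 elif token in IGNORED_TOKENS:
--                     cur[j] = nxt[j]
--             res1[p] = cur[1]
--             nxt = cur
--         for i in range(n):
--             if norm[i] == ans[0]:
--                 e = res1[i + 1]
--                 if e is not None:
--                     spans.append((i, e))
--     return spans
-- ===== Notes on version B (the rewrite author's own statement) =====
-- stated objective: alternative
-- what changed: B replaces A's word_positions index plus per-start greedy while-loop rescanning with one backward dynamic-programming pass per answer that tabulates, for every passage position, the span end of matching the answer tail from there, then a single forward sweep over the passage reads the spans off the table.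
import Mathlib
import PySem

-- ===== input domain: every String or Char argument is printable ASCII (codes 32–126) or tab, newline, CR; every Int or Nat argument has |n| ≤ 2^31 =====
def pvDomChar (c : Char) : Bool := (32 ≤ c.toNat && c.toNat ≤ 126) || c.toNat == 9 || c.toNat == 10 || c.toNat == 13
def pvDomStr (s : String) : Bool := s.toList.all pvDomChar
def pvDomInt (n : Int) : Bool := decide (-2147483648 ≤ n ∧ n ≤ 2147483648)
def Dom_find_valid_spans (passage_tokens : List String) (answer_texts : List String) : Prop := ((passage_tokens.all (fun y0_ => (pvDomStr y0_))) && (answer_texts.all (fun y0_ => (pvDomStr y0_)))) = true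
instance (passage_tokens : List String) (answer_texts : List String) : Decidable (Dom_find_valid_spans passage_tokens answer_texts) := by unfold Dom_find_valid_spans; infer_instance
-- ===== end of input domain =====

-- B replaces A's index-then-greedy-rescan with one backward dynamic-programming pass per
-- answer that tabulates every match end, then a forward sweep reads spans off the table —
-- an alternative algorithm, no speed claim.


-- ===== PORT A =====

-- IGNORED_TOKENS = {'a', 'an', 'the'} (used only for membership tests)
def pvIgnored : List String := ["a", "an", "the"]

-- token.strip(USTRIPPED_CHARACTERS).lower() with USTRIPPED_CHARACTERS = "Ġ"
-- (the identical normalization expression appears in both Pythons)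
def pvNorm (s : String) : String := PySem.Str.lower (PySem.Str.stripChars s "Ġ")

-- A's inner while-loop: state (span_end, answer_index); the fuel only bounds the
-- iterations (span_end grows every iteration, so normalized.length is always enough)
def pvWhileA (normalized ans : List String) : Nat → Int × Int → Int × Int
  | 0, st => st
  | fuel + 1, (spanEnd, ansIdx) =>
    if ansIdx < (ans.length : Int) ∧ spanEnd + 1 < (normalized.length : Int) then
      let token := PySem.List.pyGetD normalized (spanEnd + 1) ""
      if PySem.List.pyGetD ans ansIdx "" == token then
        pvWhileA normalized ans fuel (spanEnd + 1, ansIdx + 1)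
      else if token ∈ pvIgnored then
        pvWhileA normalized ans fuel (spanEnd + 1, ansIdx)
      else (spanEnd, ansIdx)
    else (spanEnd, ansIdx)

def find_valid_spans (passage_tokens : List String) (answer_texts : List String) : List (Int × Int) :=
  let normalized := passage_tokens.map pvNorm
  let word_positions : PySem.Dict String (List Int) :=
    (PySem.List.enumerate normalized).foldl (fun d p => d.modify p.2 [] (· ++ [p.1])) PySem.Dict.empty
  answer_texts.foldl (fun spans answer_text =>
    let answer_tokens := (PySem.Str.split₀ answer_text).map pvNorm
    match answer_tokens with
    | [] => spans
    | a0 :: _ =>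
      if word_positions.contains a0 then
        (word_positions.getD a0 []).foldl (fun spans span_start =>
          let r := pvWhileA normalized answer_tokens normalized.length (span_start, 1)
          if ((answer_tokens.length : Int) == r.2) then spans ++ [(span_start, r.1)] else spans) spans
      else spans) []

-- ===== PORT B =====

-- one DP row at position p: cur = [None]*(m+1); cur[m] = p-1; the j-loop filling cur[j]
def pvRowB (tok : String) (ans : List String) (nxt : List (Option Int)) (p : Int) : List (Option Int) :=
  (List.range ans.length).map (fun j =>
    if tok == ans.getD j "" then nxt.getD (j + 1) none
    else if tok ∈ pvIgnored then nxt.getD j none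
    else none) ++ [some (p - 1)]

-- B's backward loop 'for p in range(n-1, -1, -1)' as recursion on the passage suffix
-- starting at position p; returns (row at p, the res1 entries for positions p..n)
def pvDP (ans : List String) : List String → Int → (List (Option Int)) × (List (Option Int))
  | [], p =>
    let row := (List.range ans.length).map (fun _ => (none : Option Int)) ++ [some (p - 1)]
    (row, [row.getD 1 none])
  | tok :: rest, p =>
    let pr := pvDP ans rest (p + 1)
    let row := pvRowB tok ans pr.1 p
    (row, row.getD 1 none :: pr.2)

def find_valid_spans_alt (passage_tokens : List String) (answer_texts : List String) : List (Int × Int) :=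
  let normalized := passage_tokens.map pvNorm
  answer_texts.foldl (fun spans answer_text =>
    match (PySem.Str.split₀ answer_text).map pvNorm with
    | [] => spans
    | a0 :: rest =>
      let res1 := (pvDP (a0 :: rest) normalized 0).2
      (PySem.List.enumerate normalized).foldl (fun spans p =>
        if p.2 == a0 then
          match res1.getD (p.1.toNat + 1) none with
          | some e => spans ++ [(p.1, e)]
          | none => spans
        else spans) spans) []

-- ===== PRECONDITION & SPEC =====
-- Pre_ excludes answer_texts containing a whitespace-only string: on those A raises
-- (ModuleNotFoundError from 'import ipdb', else IndexError on answer_tokens[0]).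
def Pre_find_valid_spans (passage_tokens : List String) (answer_texts : List String) : Prop :=
  ∀ at_ ∈ answer_texts, PySem.Str.split₀ at_ ≠ []
instance (passage_tokens : List String) (answer_texts : List String) : Decidable (Pre_find_valid_spans passage_tokens answer_texts) := by unfold Pre_find_valid_spans; infer_instance

def pvWitness_find_valid_spans : List String × List String := (["the", "cat", "Sat"], ["cat sat", "dog"])

def Spec_find_valid_spans (passage_tokens : List String) (answer_texts : List String) (out : List (Int × Int)) : Prop := out = find_valid_spans_alt passage_tokens answer_texts
instance (passage_tokens : List String) (answer_texts : List String) (out : List (Int × Int)) : Decidable (Spec_find_valid_spans passage_tokens answer_texts out) := by unfold Spec_find_valid_spans; infer_instance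

-- ===== CLAIM (what is proved, stated in full; the proofs are below) =====
def Claim_equal_find_valid_spans : Prop := ∀ (passage_tokens : List String) (answer_texts : List String), Dom_find_valid_spans passage_tokens answer_texts → Pre_find_valid_spans passage_tokens answer_texts → Spec_find_valid_spans passage_tokens answer_texts (find_valid_spans passage_tokens answer_texts)

-- ===== LEMMAS AND PROOFS =====

-- the specification recursion both sides are proved equal to:
-- pvMatch ans suffix p j = inclusive end of greedily matching ans[j:] from position p
def pvMatch (ans : List String) : List String → Int → Nat → Option Int
  | [], p, j => if j = ans.length then some (p - 1) else none
  | tok :: rest, p, j =>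
    if j = ans.length then some (p - 1)
    else if tok == ans.getD j "" then pvMatch ans rest (p + 1) (j + 1)
    else if tok ∈ pvIgnored then pvMatch ans rest (p + 1) j
    else none

theorem pvRowB_getD (tok : String) (ans : List String) (nxt : List (Option Int)) (p : Int)
    (j : Nat) (hj : j ≤ ans.length) :
    (pvRowB tok ans nxt p).getD j none =
      if j = ans.length then some (p - 1)
      else if tok == ans.getD j "" then nxt.getD (j + 1) none
      else if tok ∈ pvIgnored then nxt.getD j none
      else none := by
  unfold pvRowB
  rcases eq_or_lt_of_le hj with heq | hlt
  · subst heq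
    rw [List.getD_eq_getElem?_getD, List.getElem?_append_right (by simp)]
    simp
  · rw [List.getD_eq_getElem?_getD, List.getElem?_append_left (by simpa using hlt)]
    simp [hlt, Nat.ne_of_lt hlt]

theorem pvDP_row (ans : List String) : ∀ (suffix : List String) (p : Int) (j : Nat),
    j ≤ ans.length → ((pvDP ans suffix p).1).getD j none = pvMatch ans suffix p j := by
  intro suffix
  induction suffix with
  | nil =>
    intro p j hj
    rcases eq_or_lt_of_le hj with heq | hlt
    · subst heq
      simp only [pvDP, pvMatch]
      rw [List.getD_eq_getElem?_getD, List.getElem?_append_right (by simp)]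
      simp
    · simp only [pvDP, pvMatch]
      rw [List.getD_eq_getElem?_getD, List.getElem?_append_left (by simpa using hlt)]
      simp [Nat.ne_of_lt hlt]
  | cons tok rest ih =>
    intro p j hj
    simp only [pvDP, pvMatch]
    rw [pvRowB_getD tok ans _ p j hj]
    rcases eq_or_lt_of_le hj with heq | hlt
    · simp [heq]
    · rw [if_neg (Nat.ne_of_lt hlt), if_neg (Nat.ne_of_lt hlt)]
      rw [ih (p + 1) (j + 1) (by omega), ih (p + 1) j (by omega)]

theorem pvDP_res1 (ans : List String) (hm : 1 ≤ ans.length) :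
    ∀ (suffix : List String) (p : Int) (k : Nat), k ≤ suffix.length →
    ((pvDP ans suffix p).2).getD k none = pvMatch ans (suffix.drop k) (p + (k : Int)) 1 := by
  intro suffix
  induction suffix with
  | nil =>
    intro p k hk
    have hk0 : k = 0 := by simpa using hk
    subst hk0
    simp only [pvDP, List.getD_cons_zero, List.drop_nil, Nat.cast_zero, add_zero]
    have := pvDP_row ans [] p 1 hm
    simpa only [pvDP] using this
  | cons tok rest ih =>
    intro p k hk
    cases k with
    | zero =>
      simp only [pvDP, List.getD_cons_zero, List.drop_zero, Nat.cast_zero, add_zero]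
      have := pvDP_row ans (tok :: rest) p 1 hm
      simpa only [pvDP] using this
    | succ k' =>
      simp only [pvDP, List.getD_cons_succ, List.drop_succ_cons]
      rw [ih (p + 1) k' (by simpa using hk)]
      congr 1
      push_cast
      ring

-- A's while-loop computes pvMatch on the passage suffix after the current span end
theorem pvWhileA_match (normalized ans : List String) :
    ∀ (fuel e j : Nat), j ≤ ans.length → e < normalized.length →
      normalized.length ≤ fuel + e + 1 →
      (let r := pvWhileA normalized ans fuel ((e : Int), (j : Int))
       (if ((ans.length : Int) == r.2) then some r.1 else none)) =
      pvMatch ans (normalized.drop (e + 1)) ((e : Int) + 1) j := by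
  intro fuel
  induction fuel with
  | zero =>
    intro e j hj he hfuel
    have hdrop : normalized.drop (e + 1) = [] := by
      apply List.drop_eq_nil_of_le; omega
    simp only [pvWhileA, hdrop, pvMatch]
    rcases eq_or_lt_of_le hj with heq | hlt
    · simp [heq]
    · rw [if_neg (Nat.ne_of_lt hlt), if_neg (by simp; omega)]
  | succ fuel ih =>
    intro e j hj he hfuel
    rcases eq_or_lt_of_le hj with heq | hjlt
    · subst heq
      simp only [pvWhileA]
      rw [if_neg (by omega : ¬ (((ans.length : Nat) : Int) < (ans.length : Int) ∧ (e : Int) + 1 < (normalized.length : Int)))]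
      cases hdrop : normalized.drop (e + 1) with
      | nil =>
        simp [pvMatch]
      | cons t r =>
        simp [pvMatch]
    · by_cases hke : e + 1 < normalized.length
      · have hc : ((j : Int) < (ans.length : Int) ∧ (e : Int) + 1 < (normalized.length : Int)) := by
          constructor <;> [exact_mod_cast hjlt; exact_mod_cast hke]
        have hdrop : normalized.drop (e + 1) = normalized[e + 1] :: normalized.drop (e + 2) := by
          rw [List.getElem_cons_drop]
        have htok : PySem.List.pyGetD normalized ((e : Int) + 1) "" = normalized[e + 1] := by
          rw [show ((e : Int) + 1) = ((e + 1 : Nat) : Int) from by push_cast; ring,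
             PySem.List.pyGetD_natCast, List.getD_eq_getElem?_getD, List.getElem?_eq_getElem hke]
          rfl
        have hansj : PySem.List.pyGetD ans ((j : Int)) "" = ans.getD j "" := by
          rw [PySem.List.pyGetD_natCast]
        simp only [pvWhileA, hdrop, pvMatch]
        rw [if_pos hc, if_neg (Nat.ne_of_lt hjlt), htok, hansj]
        by_cases hmatch : (ans.getD j "" == normalized[e + 1]) = true
        · have hmatch2 : (normalized[e + 1] == ans.getD j "") = true := by
            simp only [beq_iff_eq] at hmatch ⊢; exact hmatch.symm
          rw [if_pos hmatch, if_pos hmatch2]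
          have H := ih (e + 1) (j + 1) (by omega) (by omega) (by omega)
          simp only at H
          push_cast at H ⊢
          convert H using 3
        · have hmatch2 : ¬ ((normalized[e + 1] == ans.getD j "") = true) := by
            simp only [beq_iff_eq] at hmatch ⊢; exact fun h => hmatch h.symm
          rw [if_neg hmatch, if_neg hmatch2]
          by_cases hig : normalized[e + 1] ∈ pvIgnored
          · rw [if_pos hig, if_pos hig]
            have H := ih (e + 1) j (by omega) (by omega) (by omega)
            simp only at H
            push_cast at H ⊢
            convert H using 3
          · rw [if_neg hig, if_neg hig]
            rw [if_neg (show ¬ (((ans.length : Int) == ((e : Int), (j : Int)).2) = true) from by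
              simp only [beq_iff_eq]; omega)]
      · have hdrop : normalized.drop (e + 1) = [] := by
          apply List.drop_eq_nil_of_le; omega
        simp only [pvWhileA, hdrop, pvMatch]
        rw [if_neg (by omega : ¬ ((j : Int) < (ans.length : Int) ∧ (e : Int) + 1 < (normalized.length : Int))),
           if_neg (Nat.ne_of_lt hjlt),
           if_neg (show ¬ (((ans.length : Int) == ((e : Int), (j : Int)).2) = true) from by
              simp only [beq_iff_eq]; omega)]

-- per-answer body equality
theorem pvBody_eq (normalized : List String) (a0 : String) (rest : List String)
    (spans : List (Int × Int)) :
    (if ((PySem.List.enumerate normalized).foldl (fun d p => d.modify p.2 [] (· ++ [p.1]))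
          (PySem.Dict.empty : PySem.Dict String (List Int))).contains a0 then
        (((PySem.List.enumerate normalized).foldl (fun d p => d.modify p.2 [] (· ++ [p.1]))
          (PySem.Dict.empty : PySem.Dict String (List Int))).getD a0 []).foldl (fun spans span_start =>
          let r := pvWhileA normalized (a0 :: rest) normalized.length (span_start, 1)
          if (((a0 :: rest).length : Int) == r.2) then spans ++ [(span_start, r.1)] else spans) spans
      else spans) =
    (PySem.List.enumerate normalized).foldl (fun spans p =>
        if p.2 == a0 then
          match ((pvDP (a0 :: rest) normalized 0).2).getD (p.1.toNat + 1) none with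
          | some e => spans ++ [(p.1, e)]
          | none => spans
        else spans) spans := by
  set wp : PySem.Dict String (List Int) :=
    (PySem.List.enumerate normalized).foldl (fun d p => d.modify p.2 [] (· ++ [p.1])) PySem.Dict.empty with hwp
  have hgetD : wp.getD a0 [] =
      ((PySem.List.enumerate normalized).filter (fun p => p.2 == a0)).map (·.1) := by
    have key : wp = List.foldl
        (fun (d : PySem.Dict String (List Int)) (q : String × Int) => d.modify q.1 [] (· ++ [q.2]))
        PySem.Dict.empty ((PySem.List.enumerate normalized).map (fun p => (p.2, p.1))) := by
      rw [List.foldl_map]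
    rw [key, PySem.Dict.getD_foldl_modify_append, List.filter_map]
    simp [Function.comp_def, List.map_map, PySem.Dict.getD_empty]
  have hA : (if wp.contains a0 then
        (wp.getD a0 []).foldl (fun spans span_start =>
          let r := pvWhileA normalized (a0 :: rest) normalized.length (span_start, 1)
          if (((a0 :: rest).length : Int) == r.2) then spans ++ [(span_start, r.1)] else spans) spans
      else spans) =
      (wp.getD a0 []).foldl (fun spans span_start =>
          let r := pvWhileA normalized (a0 :: rest) normalized.length (span_start, 1)
          if (((a0 :: rest).length : Int) == r.2) then spans ++ [(span_start, r.1)] else spans) spans := by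
    by_cases hcont : wp.contains a0
    · rw [if_pos hcont]
    · rw [if_neg hcont, PySem.Dict.getD_of_not_contains _ _ (by simpa using hcont)]
      rfl
  rw [hA, hgetD, List.foldl_map]
  conv_rhs => rw [PySem.List.foldl_if_eq_foldl_filter]
  apply PySem.List.foldl_congr_mem
  intro acc p hp
  have hpe : p ∈ PySem.List.enumerate normalized := List.mem_of_mem_filter hp
  obtain ⟨k, hk, rfl⟩ := (PySem.List.mem_enumerate_iff normalized 0 p).1 hpe
  simp only [zero_add, Int.toNat_natCast]
  have Hres1 := pvDP_res1 (a0 :: rest) (by simp) normalized 0 (k + 1) (by omega)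
  rw [Hres1]
  have HW := pvWhileA_match normalized (a0 :: rest) normalized.length k 1 (by simp) hk (by omega)
  simp only [Nat.cast_one] at HW
  rw [show ((0 : Int) + ((k + 1 : Nat) : Int)) = ((k : Int) + 1) from by push_cast; ring] at Hres1
  rw [show ((0 : Int) + ((k + 1 : Nat) : Int)) = ((k : Int) + 1) from by push_cast; ring]
  rw [← HW]
  set r := pvWhileA normalized (a0 :: rest) normalized.length ((k : Int), 1) with hr
  by_cases h : ((rest.length : Int) + 1 = r.2) <;> simp [h]

theorem main_eq (pts ats : List String) : find_valid_spans pts ats = find_valid_spans_alt pts ats := by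
  simp only [find_valid_spans, find_valid_spans_alt]
  congr 1
  funext spans answer_text
  cases h : (PySem.Str.split₀ answer_text).map pvNorm with
  | nil => rfl
  | cons a0 rest =>
    exact pvBody_eq (pts.map pvNorm) a0 rest spans

-- ===== VERDICT (by name: the statement is the Claim_ definition above) =====
theorem find_valid_spans_spec : Claim_equal_find_valid_spans := by
  intro passage_tokens answer_texts _ _
  exact main_eq passage_tokens answer_texts
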